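-- pv_equiv track=rewrite | github.com/JessyColonval/Advent_of_code | 2024/Day_12/solution.py | divide_by_column
-- ===== SOURCE A (Python) =====
-- from typing import List, Tuple, Dict
--
-- def divide_by_column(indices: List[Tuple[int]]) -> Dict[int, List[Tuple[int]]]:
--     """
--     Separates a region according to its columns.
--
--     Parameters
--     ----------
--     indices : List[Tuple[int]]
--         A list of coordinates of similar plants that shares the same region.
--
--     Return
--     ------
--     Dict[int, List[Tuple[int]]]
--         A dictionnary that map a number of column in the garden with the
--         coordinates of every plant in the given region on this column.
--     """
--     result = {}
--     for plant in indices: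
--         y = plant[1]
--         if y not in result:
--             result[y] = []
--         result[y].append(plant)
--     return {
--         key: sorted(values, key=lambda t: t[0])
--         for key, values in result.items()
--     }
-- ===== SOURCE B (Python) =====
-- def divide_by_column(indices):
--     result = {plant[1]: [] for plant in indices}
--     for plant in sorted(indices, key=lambda t: t[0]):
--         result[plant[1]].append(plant)
--     return result
-- ===== Notes on version B (the rewrite author's own statement) =====
-- stated objective: simpler
-- what changed: B stably sorts the whole list by row once and then fills pre-created per-column lists in a single pass, instead of A's grouping first and then sorting each column's list separately.
import Mathlib
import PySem

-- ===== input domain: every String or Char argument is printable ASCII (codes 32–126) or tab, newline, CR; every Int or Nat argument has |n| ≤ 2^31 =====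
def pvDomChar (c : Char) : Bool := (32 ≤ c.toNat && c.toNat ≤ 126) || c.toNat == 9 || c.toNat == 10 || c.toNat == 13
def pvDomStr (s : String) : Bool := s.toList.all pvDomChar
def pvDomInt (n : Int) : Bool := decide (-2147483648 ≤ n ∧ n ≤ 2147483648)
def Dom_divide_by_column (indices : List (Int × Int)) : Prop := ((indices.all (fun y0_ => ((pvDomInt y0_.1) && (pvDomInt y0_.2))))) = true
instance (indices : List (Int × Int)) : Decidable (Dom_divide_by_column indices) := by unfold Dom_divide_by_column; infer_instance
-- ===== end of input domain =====

-- B stably sorts the whole list by row once and then groups by column in one pass,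
-- replacing A's group-then-per-group-sort; objective: simpler.


-- ===== PORT A =====
def divide_by_column (indices : List (Int × Int)) : List (Int × List (Int × Int)) :=
  let result : PySem.Dict Int (List (Int × Int)) :=
    indices.foldl (fun d plant =>
      let y := plant.2
      let d' := if d.contains y then d else d.insert y []
      d'.modify y [] (fun vs => vs ++ [plant])) PySem.Dict.empty
  (result.items.foldl (fun d kv =>
      d.insert kv.1 (PySem.List.sorted kv.2 (fun t => t.1) false)) PySem.Dict.empty).items

-- ===== PORT B =====
def divide_by_column_alt (indices : List (Int × Int)) : List (Int × List (Int × Int)) :=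
  let result : PySem.Dict Int (List (Int × Int)) :=
    indices.foldl (fun d plant => d.insert plant.2 []) PySem.Dict.empty
  ((PySem.List.sorted indices (fun t => t.1) false).foldl
      (fun d plant => d.modify plant.2 [] (fun vs => vs ++ [plant])) result).items

-- ===== PRECONDITION & SPEC =====
def Spec_divide_by_column (indices : List (Int × Int)) (out : List (Int × List (Int × Int))) : Prop := out = divide_by_column_alt indices
instance (indices : List (Int × Int)) (out : List (Int × List (Int × Int))) : Decidable (Spec_divide_by_column indices out) := by unfold Spec_divide_by_column; infer_instance

-- ===== CLAIM (what is proved, stated in full; the proofs are below) =====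
def Claim_equal_divide_by_column : Prop := ∀ (indices : List (Int × Int)), Dom_divide_by_column indices → Spec_divide_by_column indices (divide_by_column indices)

-- ===== LEMMAS AND PROOFS =====

-- the row comparison used by the stable sorts
def pvBf : (Int × Int) → (Int × Int) → Bool := fun a b => decide (a.1 < b.1)

-- the grouping step both loops reduce to
def pvStepM (d : PySem.Dict Int (List (Int × Int))) (p : Int × Int) : PySem.Dict Int (List (Int × Int)) :=
  d.modify p.2 [] (fun vs => vs ++ [p])

-- A's loop body (setdefault-then-append) is exactly the modify step
theorem pvStepA_eq (d : PySem.Dict Int (List (Int × Int))) (p : Int × Int) :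
    (if d.contains p.2 then d else d.insert p.2 []).modify p.2 [] (fun vs => vs ++ [p])
    = pvStepM d p := by
  by_cases h : d.contains p.2
  · simp [pvStepM, h]
  · have h' : d.contains p.2 = false := by simpa using h
    have hd : d.getD p.2 ([] : List (Int × Int)) = [] :=
      PySem.Dict.getD_of_not_contains d [] h'
    simp [pvStepM, PySem.Dict.modify, h', hd, PySem.Dict.getD_insert_self,
      PySem.Dict.insert_insert_self]

theorem pvKeys_insert_add (d : PySem.Dict Int (List (Int × Int))) (k : Int) (v : List (Int × Int)) :
    (d.insert k v).keys = PySem.Set.add d.keys k := by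
  by_cases hc : d.contains k
  · rw [PySem.Dict.keys_insert_of_contains d v hc]
    have hm : k ∈ d.keys := (PySem.Dict.contains_iff_mem_keys (d := d) (k := k)).mp hc
    simp [PySem.Set.add, hm]
  · have h' : d.contains k = false := by simpa using hc
    rw [PySem.Dict.keys_insert_of_not_contains d v h']
    have hm : k ∉ d.keys := fun hh =>
      hc ((PySem.Dict.contains_iff_mem_keys (d := d) (k := k)).mpr hh)
    simp [PySem.Set.add, hm]

theorem pvGetD_foldM (l : List (Int × Int)) (d : PySem.Dict Int (List (Int × Int))) (c : Int) :
    (l.foldl pvStepM d).getD c []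
    = d.getD c [] ++ l.filter (fun p => p.2 == c) := by
  induction l generalizing d with
  | nil => simp
  | cons p t ih =>
    simp only [List.foldl_cons, ih, List.filter_cons]
    by_cases h : p.2 = c
    · subst h
      simp [pvStepM, PySem.Dict.getD_modify_self]
    · simp [pvStepM, PySem.Dict.getD_modify, h, Ne.symm h]

theorem pvKeys_foldM (l : List (Int × Int)) (d : PySem.Dict Int (List (Int × Int))) :
    (l.foldl pvStepM d).keys = PySem.Set.update d.keys (l.map (·.2)) := by
  induction l generalizing d with
  | nil => rfl
  | cons p t ih =>
    simp only [List.foldl_cons, List.map_cons]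
    rw [ih]
    have hk : (pvStepM d p).keys = PySem.Set.add d.keys p.2 := by
      rw [pvStepM, PySem.Dict.keys_modify, pvKeys_insert_add]
    rw [hk]
    rfl

theorem pvKeys_foldI (l : List (Int × Int)) (d : PySem.Dict Int (List (Int × Int))) :
    (l.foldl (fun d p => d.insert p.2 ([] : List (Int × Int))) d).keys
    = PySem.Set.update d.keys (l.map (·.2)) := by
  induction l generalizing d with
  | nil => rfl
  | cons p t ih =>
    simp only [List.foldl_cons, List.map_cons]
    rw [ih, pvKeys_insert_add]
    rfl

theorem pvGetD_foldI (l : List (Int × Int)) (d : PySem.Dict Int (List (Int × Int)))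
    (h : ∀ c, d.getD c [] = []) (c : Int) :
    (l.foldl (fun d p => d.insert p.2 ([] : List (Int × Int))) d).getD c [] = [] := by
  induction l generalizing d with
  | nil => exact h c
  | cons p t ih =>
    simp only [List.foldl_cons]
    refine ih _ (fun c' => ?_)
    rw [PySem.Dict.getD_insert]
    split <;> simp [h]

theorem pvSet_update_absorb (s : PySem.Set Int) (m : List Int) (h : ∀ x ∈ m, x ∈ s) :
    PySem.Set.update s m = s := by
  induction m generalizing s with
  | nil => rfl
  | cons x t ih =>
    have hx : PySem.Set.add s x = s := by
      simp [PySem.Set.add, h x List.mem_cons_self]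
    simp only [PySem.Set.update, List.foldl_cons]
    rw [show List.foldl PySem.Set.add (PySem.Set.add s x) t
          = PySem.Set.update (PySem.Set.add s x) t from rfl, hx]
    exact ih s (fun y hy => h y (List.mem_cons_of_mem _ hy))

theorem pvSorted_eq (l : List (Int × Int)) :
    PySem.List.sorted l (fun t => t.1) false
    = l.foldl (fun acc x => PySem.List.insertBy pvBf x acc) [] := rfl

theorem pvInsertBy_all_before (x : Int × Int) (t : List (Int × Int))
    (h : ∀ z ∈ t, pvBf x z = true) :
    PySem.List.insertBy pvBf x t = x :: t := by
  cases t with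
  | nil => rfl
  | cons z zs => simp [PySem.List.insertBy, h z List.mem_cons_self]

theorem pvFilter_insertBy (p : (Int × Int) → Bool) (x : Int × Int) (s : List (Int × Int))
    (hs : s.Pairwise (fun a b => a.1 ≤ b.1)) :
    (PySem.List.insertBy pvBf x s).filter p
    = if p x then PySem.List.insertBy pvBf x (s.filter p) else s.filter p := by
  induction s with
  | nil =>
    simp only [PySem.List.insertBy, List.filter_nil]
    by_cases hp : p x <;> simp [hp]
  | cons y ys ih =>
    rcases List.pairwise_cons.mp hs with ⟨hy, hys⟩
    by_cases hb : pvBf x y = true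
    · have hstep : PySem.List.insertBy pvBf x (y :: ys) = x :: y :: ys := by
        simp [PySem.List.insertBy, hb]
      have hall : ∀ z ∈ (y :: ys).filter p, pvBf x z = true := by
        intro z hz
        have hz' := List.mem_of_mem_filter hz
        rcases List.mem_cons.mp hz' with h1 | h1
        · simpa [h1] using hb
        · have h2 : y.1 ≤ z.1 := hy z h1
          have hxy : x.1 < y.1 := by simpa [pvBf] using hb
          simp only [pvBf, decide_eq_true_eq]
          omega
      rw [hstep]
      by_cases hp : p x
      · rw [pvInsertBy_all_before x _ hall]
        simp [List.filter_cons, hp]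
      · simp [List.filter_cons, hp]
    · have hstep : PySem.List.insertBy pvBf x (y :: ys) = y :: PySem.List.insertBy pvBf x ys := by
        simp [PySem.List.insertBy, hb]
      rw [hstep]
      simp only [List.filter_cons]
      by_cases hpy : p y
      · by_cases hpx : p x
        · have hstep2 : PySem.List.insertBy pvBf x (y :: ys.filter p)
              = y :: PySem.List.insertBy pvBf x (ys.filter p) := by
            simp [PySem.List.insertBy, hb]
          simp [hpy, hpx, ih hys, hstep2]
        · simp [hpy, hpx, ih hys]
      · simp [hpy, ih hys]

theorem pvFilter_sorted (p : (Int × Int) → Bool) (l : List (Int × Int)) :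
    (PySem.List.sorted l (fun t => t.1) false).filter p
    = PySem.List.sorted (l.filter p) (fun t => t.1) false := by
  rw [pvSorted_eq, pvSorted_eq]
  induction l using List.reverseRecOn with
  | nil => rfl
  | append_singleton t x ih =>
    rw [List.filter_append, List.foldl_append]
    simp only [List.foldl_cons, List.foldl_nil]
    have hpw : (t.foldl (fun acc x => PySem.List.insertBy pvBf x acc) []).Pairwise
        (fun a b => a.1 ≤ b.1) := by
      rw [← pvSorted_eq]
      exact PySem.List.sorted_pairwise t _
    rw [pvFilter_insertBy p x _ hpw, ih]
    by_cases hp : p x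
    · simp [hp, List.foldl_append]
    · simp [hp]

theorem pv_main (l : List (Int × Int)) : divide_by_column l = divide_by_column_alt l := by
  -- rewrite A's loop body to the shared modify step
  have hA1 : (l.foldl (fun d plant =>
        let y := plant.2
        let d' := if d.contains y then d else d.insert y []
        d'.modify y [] (fun vs => vs ++ [plant])) PySem.Dict.empty)
      = l.foldl pvStepM PySem.Dict.empty := by
    congr 1
    funext d p
    exact pvStepA_eq d p
  have hB1 : (fun (d : PySem.Dict Int (List (Int × Int))) (plant : Int × Int) =>
        d.modify plant.2 [] (fun vs => vs ++ [plant])) = pvStepM := rfl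
  -- names for the intermediate dictionaries
  set G : PySem.Dict Int (List (Int × Int)) := l.foldl pvStepM PySem.Dict.empty with hG
  set R : PySem.Dict Int (List (Int × Int)) :=
    l.foldl (fun d p => d.insert p.2 ([] : List (Int × Int))) PySem.Dict.empty with hR
  set S : List (Int × Int) := PySem.List.sorted l (fun t => t.1) false with hS
  set H : PySem.Dict Int (List (Int × Int)) := S.foldl pvStepM R with hH
  -- keys
  have hkG : G.keys = PySem.Set.ofList (l.map (·.2)) := by
    rw [hG, pvKeys_foldM, PySem.Dict.keys_empty]; rfl
  have hkR : R.keys = PySem.Set.ofList (l.map (·.2)) := by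
    rw [hR, pvKeys_foldI, PySem.Dict.keys_empty]; rfl
  have hkH : H.keys = PySem.Set.ofList (l.map (·.2)) := by
    rw [hH, pvKeys_foldM, hkR]
    apply pvSet_update_absorb
    intro x hx
    rcases List.mem_map.mp hx with ⟨q, hq, rfl⟩
    have hql : q ∈ l := (PySem.List.mem_sorted l (fun t => t.1) false q).mp hq
    exact (PySem.Set.mem_ofList _ _).mpr (List.mem_map.mpr ⟨q, hql, rfl⟩)
  have hndG : G.keys.Nodup := by rw [hkG]; exact PySem.Set.nodup_ofList _
  have hndH : H.keys.Nodup := by rw [hkH]; exact PySem.Set.nodup_ofList _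
  -- values
  have hgG : ∀ c, G.getD c [] = l.filter (fun p => p.2 == c) := by
    intro c
    rw [hG, pvGetD_foldM, PySem.Dict.getD_empty]
    rfl
  have hgH : ∀ c, H.getD c [] = S.filter (fun p => p.2 == c) := by
    intro c
    rw [hH, pvGetD_foldM]
    rw [pvGetD_foldI l PySem.Dict.empty (fun c' => PySem.Dict.getD_empty c' []) c]
    rfl
  -- A's output
  have hAout : divide_by_column l
      = G.items.map (fun kv => (kv.1, PySem.List.sorted kv.2 (fun t => t.1) false)) := by
    show (((l.foldl (fun d plant =>
        let y := plant.2
        let d' := if d.contains y then d else d.insert y []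
        d'.modify y [] (fun vs => vs ++ [plant])) PySem.Dict.empty).items).foldl
        (fun d kv => d.insert kv.1 (PySem.List.sorted kv.2 (fun t => t.1) false))
        PySem.Dict.empty).items = _
    rw [hA1]
    have hfresh := PySem.Dict.items_foldl_insert_fresh G.items (fun kv => kv.1)
      (fun kv => PySem.List.sorted kv.2 (fun t => t.1) false) PySem.Dict.empty
      (fun a _ => PySem.Dict.contains_empty a.1) (by exact hndG)
    simpa using hfresh
  -- B's output
  have hBout : divide_by_column_alt l = H.items := by
    show ((PySem.List.sorted l (fun t => t.1) false).foldl
        (fun d plant => d.modify plant.2 [] (fun vs => vs ++ [plant]))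
        (l.foldl (fun d plant => d.insert plant.2 []) PySem.Dict.empty)).items = _
    rw [hB1]
  rw [hAout, hBout]
  rw [PySem.Dict.items_eq_map_keys G hndG [], PySem.Dict.items_eq_map_keys H hndH []]
  rw [List.map_map, hkG, hkH]
  apply List.map_congr_left
  intro k _
  simp only [Function.comp]
  rw [hgG, hgH, hS, ← pvFilter_sorted]

-- ===== VERDICT (by name: the statement is the Claim_ definition above) =====
theorem divide_by_column_spec : Claim_equal_divide_by_column := by
  intro l _
  unfold Spec_divide_by_column
  exact pv_main l
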